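-- pv_equiv track=rewrite | github.com/sunheqing/MySQL_data_clean | functions/deal_with_number.py | zero_only
-- ===== SOURCE A (Python) =====
-- def zero_only(field):
--     a=0
--     for ch in field:
--         if ch=='0':
--             a = a+1
--         else:
--             pass
--     if a==len(field):
--         return True
--     else:
--         return False
-- ===== SOURCE B (Python) =====
-- def zero_only(field):
--     # idiomatic: distinct characters of field must be a subset of {'0'}
--     return set(field) <= {'0'}
-- ===== Notes on version B (the rewrite author's own statement) =====
-- stated objective: idiomatic
-- what changed: Replaces the per-character tally compared to len(field) with a single subset test of the string's distinct-character set against the one-element set of the zero character.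
import Mathlib
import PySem

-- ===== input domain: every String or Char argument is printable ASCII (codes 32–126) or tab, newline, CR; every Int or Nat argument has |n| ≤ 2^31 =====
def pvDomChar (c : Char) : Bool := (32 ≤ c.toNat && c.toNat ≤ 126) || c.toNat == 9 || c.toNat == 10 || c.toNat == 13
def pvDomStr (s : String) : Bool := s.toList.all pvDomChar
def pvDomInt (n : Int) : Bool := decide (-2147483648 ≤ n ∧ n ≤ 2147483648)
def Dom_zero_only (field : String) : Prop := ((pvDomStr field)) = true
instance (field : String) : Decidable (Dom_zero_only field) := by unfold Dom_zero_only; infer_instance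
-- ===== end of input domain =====

-- B replaces A's count-of-'0'-vs-length tally with an idiomatic subset test: set(field) <= {'0'}.


-- ===== PORT A =====
-- a = 0; for ch in field: if ch=='0': a = a+1; return a == len(field)
def zero_only (field : String) : Bool :=
  let a : Int := field.toList.foldl (fun a ch => if ch = '0' then a + 1 else a) 0
  if a = PySem.Str.len field then true else false

-- ===== PORT B =====
-- return set(field) <= {'0'}
def zero_only_alt (field : String) : Bool :=
  PySem.Set.issubset (PySem.Set.ofList field.toList) (PySem.Set.ofList ['0'])

-- ===== PRECONDITION & SPEC =====
def Spec_zero_only (field : String) (out : Bool) : Prop := out = zero_only_alt field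
instance (field : String) (out : Bool) : Decidable (Spec_zero_only field out) := by unfold Spec_zero_only; infer_instance

-- ===== CLAIM (what is proved, stated in full; the proofs are below) =====
def Claim_equal_zero_only : Prop := ∀ (field : String), Dom_zero_only field → Spec_zero_only field (zero_only field)

-- ===== LEMMAS AND PROOFS =====

-- A's loop computes the count of '0' in the list (shifted by the accumulator).
theorem zero_only_foldl_count (l : List Char) (a : Int) :
    l.foldl (fun a ch => if ch = '0' then a + 1 else a) a = a + l.count '0' := by
  induction l generalizing a with
  | nil => simp
  | cons c t ih =>
    by_cases h : c = '0' <;> simp [List.foldl, h, ih]; ring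

-- B's subset test holds iff every character of the list is '0'.
theorem alt_iff_all (l : List Char) :
    (PySem.Set.issubset (PySem.Set.ofList l) (PySem.Set.ofList ['0'])) = true ↔
      ∀ c ∈ l, c = '0' := by
  simp only [PySem.Set.issubset, List.all_eq_true]
  constructor
  · intro h c hc
    have := h c ((PySem.Set.mem_ofList l c).mpr hc)
    simpa [PySem.Set.contains, PySem.Set.ofList] using this
  · intro h x hx
    have hx' := (PySem.Set.mem_ofList l x).mp hx
    simp [PySem.Set.contains, PySem.Set.ofList, h x hx']

-- ===== VERDICT (by name: the statement is the Claim_ definition above) =====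
theorem zero_only_spec : Claim_equal_zero_only := by
  intro field _
  unfold Spec_zero_only zero_only zero_only_alt
  simp only [zero_only_foldl_count, zero_add, PySem.Str.len_eq]
  rw [Bool.eq_iff_iff, alt_iff_all]
  split_ifs with hcnt
  · simp only [true_iff]
    exact fun c hc => (List.count_eq_length.mp (by exact_mod_cast hcnt) c hc).symm
  · simp only [false_iff]
    intro h
    exact hcnt (by exact_mod_cast List.count_eq_length.mpr (fun b hb => (h b hb).symm))
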